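-- pv_equiv track=rewrite | github.com/ayushsupekar/StudyGenie | sunhacks/studygenie/ai_services.py | format_structured_summary
-- ===== SOURCE A (Python) =====
-- def format_structured_summary(summary_text):
--     """Format summary with proper structure and bullet points"""
--     # Remove redundant phrases
--     redundant_phrases = [
--         'as mentioned', 'as stated', 'as discussed', 'as we can see',
--         'it is important to note', 'it should be noted', 'furthermore',
--         'in addition', 'moreover', 'additionally', 'also mentioned'
--     ]
--
--     for phrase in redundant_phrases:
--         summary_text = summary_text.replace(phrase, '')
--
--     # Clean up the text
--     summary_text = ' '.join(summary_text.split())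
--
--     # If already well-formatted with bullet points, return as is
--     if '\n•' in summary_text or '\n- ' in summary_text:
--         return summary_text
--
--     # If it has markdown bullets, convert them
--     if '**' in summary_text or '- ' in summary_text:
--         lines = [line.strip() for line in summary_text.split('\n') if line.strip()]
--         formatted_lines = []
--
--         for line in lines:
--             if line.startswith('- '):
--                 formatted_lines.append(f"• {line[2:].strip()}")
--             elif line.startswith('**') and line.endswith('**'):
--                 # Skip markdown headers
--                 continue
--             else:
--                 formatted_lines.append(line)
--
--         return '\n'.join(formatted_lines)
--
--     return summary_text
-- ===== SOURCE B (Python) =====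
-- def format_structured_summary(summary_text):
--     """Format summary with proper structure and bullet points"""
--     redundant_phrases = [
--         'as mentioned', 'as stated', 'as discussed', 'as we can see',
--         'it is important to note', 'it should be noted', 'furthermore',
--         'in addition', 'moreover', 'additionally', 'also mentioned'
--     ]
--     for phrase in redundant_phrases:
--         summary_text = summary_text.replace(phrase, '')
--
--     # Whitespace normalization removes every newline, so the text is one line.
--     summary_text = ' '.join(summary_text.split())
--
--     if summary_text.startswith('- '):
--         return '\u2022 ' + summary_text[2:].strip()
--     if summary_text.startswith('**') and summary_text.endswith('**'):
--         return ''
--     return summary_text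
-- ===== Notes on version B (the rewrite author's own statement) =====
-- stated objective: simpler
-- what changed: After the shared phrase removal and whitespace normalization no newline can remain, so B drops A's line-splitting comprehension and per-line loop and decides directly on the single normalized string with three cases (bullet prefix, markdown header, unchanged).
import Mathlib
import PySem

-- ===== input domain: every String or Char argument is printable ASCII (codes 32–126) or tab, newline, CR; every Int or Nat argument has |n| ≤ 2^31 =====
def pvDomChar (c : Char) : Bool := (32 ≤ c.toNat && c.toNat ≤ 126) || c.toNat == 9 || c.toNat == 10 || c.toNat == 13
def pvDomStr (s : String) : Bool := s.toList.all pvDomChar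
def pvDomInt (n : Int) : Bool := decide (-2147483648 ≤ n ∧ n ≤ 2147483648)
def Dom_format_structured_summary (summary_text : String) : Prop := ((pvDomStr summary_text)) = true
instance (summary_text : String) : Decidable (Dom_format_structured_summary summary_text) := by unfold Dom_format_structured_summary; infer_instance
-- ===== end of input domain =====

-- B keeps A's phrase removal and whitespace normalization, then — since normalization removes
-- every newline — replaces A's per-line loop by direct tests on the single normalized line (simpler).

-- ===== PORT A =====
-- the redundant-phrase list, identical lines in both Pythons, shared verbatim
def pvPhrases : List (List Char) :=
  ["as mentioned", "as stated", "as discussed", "as we can see",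
   "it is important to note", "it should be noted", "furthermore",
   "in addition", "moreover", "additionally", "also mentioned"].map String.toList

def pvFsA (u : List Char) : List Char :=
  let u1 := pvPhrases.foldl (fun s p => PySem.Chars.replace s p []) u
  let t := PySem.Chars.join [' '] (PySem.Chars.split₀ u1)
  if PySem.Chars.isIn ['\n', '•'] t || PySem.Chars.isIn ['\n', '-', ' '] t then t
  else if PySem.Chars.isIn ['*', '*'] t || PySem.Chars.isIn ['-', ' '] t then
    let lines := ((PySem.Chars.splitOn t ['\n']).map PySem.Chars.strip).filter (fun l => !l.isEmpty)
    let formatted := lines.foldl (fun acc line =>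
      if PySem.Chars.startswith line ['-', ' '] then
        acc ++ [['•', ' '] ++ PySem.Chars.strip (line.drop 2)]
      else if PySem.Chars.startswith line ['*', '*'] && PySem.Chars.endswith line ['*', '*'] then
        acc
      else acc ++ [line]) []
    PySem.Chars.join ['\n'] formatted
  else t

def format_structured_summary (summary_text : String) : String :=
  String.ofList (pvFsA summary_text.toList)

-- ===== PORT B =====
def pvFsB (u : List Char) : List Char :=
  let u1 := pvPhrases.foldl (fun s p => PySem.Chars.replace s p []) u
  let t := PySem.Chars.join [' '] (PySem.Chars.split₀ u1)
  if PySem.Chars.startswith t ['-', ' '] then ['•', ' '] ++ PySem.Chars.strip (t.drop 2)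
  else if PySem.Chars.startswith t ['*', '*'] && PySem.Chars.endswith t ['*', '*'] then []
  else t

def format_structured_summary_alt (summary_text : String) : String :=
  String.ofList (pvFsB summary_text.toList)

-- ===== PRECONDITION & SPEC =====
def Spec_format_structured_summary (summary_text : String) (out : String) : Prop := out = format_structured_summary_alt summary_text
instance (summary_text : String) (out : String) : Decidable (Spec_format_structured_summary summary_text out) := by unfold Spec_format_structured_summary; infer_instance

-- ===== CLAIM (what is proved, stated in full; the proofs are below) =====
def Claim_equal_format_structured_summary : Prop := ∀ (summary_text : String), Dom_format_structured_summary summary_text → Spec_format_structured_summary summary_text (format_structured_summary summary_text)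

-- ===== LEMMAS AND PROOFS =====

def pvTok (w : List Char) : Prop := w ≠ [] ∧ ∀ c ∈ w, PySem.Chars.isspace c = false

lemma pvSplit₀goTok (s : List Char) : ∀ (cur : List Char) (acc : List (List Char)),
    (∀ c ∈ cur, PySem.Chars.isspace c = false) → (∀ w ∈ acc, pvTok w) →
    ∀ w ∈ PySem.Chars.split₀.go s cur acc, pvTok w := by
  induction s with
  | nil =>
    intro cur acc hcur hacc w hw
    simp only [PySem.Chars.split₀.go] at hw
    split at hw
    · exact hacc w (List.mem_reverse.mp hw)
    · next hne =>
      rcases List.mem_cons.mp (List.mem_reverse.mp hw) with h | h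
      · subst h
        refine ⟨by simpa [List.isEmpty_iff] using hne, ?_⟩
        intro c hc; exact hcur c (List.mem_reverse.mp hc)
      · exact hacc w h
  | cons c rest ih =>
    intro cur acc hcur hacc w hw
    simp only [PySem.Chars.split₀.go] at hw
    split at hw
    · split at hw
      · exact ih [] acc (by simp) hacc w hw
      · next hne =>
        refine ih [] _ (by simp) ?_ w hw
        intro v hv
        rcases List.mem_cons.mp hv with h | h
        · subst h
          exact ⟨by simpa [List.isEmpty_iff] using hne,
            fun d hd => hcur d (List.mem_reverse.mp hd)⟩
        · exact hacc v h
    · next hsp =>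
      refine ih (c :: cur) acc ?_ hacc w hw
      intro d hd
      rcases List.mem_cons.mp hd with h | h
      · subst h; simpa using hsp
      · exact hcur d h

lemma pvSplit₀Tok (u : List Char) : ∀ w ∈ PySem.Chars.split₀ u, pvTok w :=
  pvSplit₀goTok u [] [] (by simp) (by simp)

lemma pvInterMem : ∀ (L : List (List Char)), (∀ w ∈ L, pvTok w) →
    ∀ c ∈ List.intercalate [' '] L, c = ' ' ∨ PySem.Chars.isspace c = false := by
  intro L
  induction L with
  | nil => simp [List.intercalate]
  | cons w L ih =>
    intro hL c hc
    cases L with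
    | nil =>
      simp [List.intercalate, List.intersperse] at hc
      exact Or.inr ((hL w (by simp)).2 c hc)
    | cons v rest =>
      have : List.intercalate [' '] (w :: v :: rest)
          = w ++ ' ' :: List.intercalate [' '] (v :: rest) := by
        simp [List.intercalate, List.intersperse]
      rw [this] at hc
      rcases List.mem_append.mp hc with h | h
      · exact Or.inr ((hL w (by simp)).2 c h)
      · rcases List.mem_cons.mp h with h | h
        · exact Or.inl h
        · exact ih (fun x hx => hL x (by simp [hx])) c h

lemma pvInterHead : ∀ (L : List (List Char)), (∀ w ∈ L, pvTok w) →
    List.intercalate [' '] L = [] ∨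
    ∃ c t', List.intercalate [' '] L = c :: t' ∧ PySem.Chars.isspace c = false := by
  intro L hL
  cases L with
  | nil => exact Or.inl (by simp [List.intercalate])
  | cons w L =>
    right
    obtain ⟨hne, hns⟩ := hL w (by simp)
    obtain ⟨c, w', rfl⟩ := List.exists_cons_of_ne_nil hne
    cases L with
    | nil => exact ⟨c, w', by simp [List.intercalate, List.intersperse], hns c (by simp)⟩
    | cons v rest =>
      refine ⟨c, w' ++ ' ' :: List.intercalate [' '] (v :: rest), ?_, hns c (by simp)⟩
      simp [List.intercalate, List.intersperse]

lemma pvInterSnoc : ∀ (A : List (List Char)) (b : List Char), A ≠ [] →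
    List.intercalate [' '] (A ++ [b]) = List.intercalate [' '] A ++ ' ' :: b := by
  intro A
  induction A with
  | nil => simp
  | cons a A ih =>
    intro b _
    cases A with
    | nil => simp [List.intercalate, List.intersperse]
    | cons a' A' =>
      have h1 : List.intercalate [' '] ((a :: a' :: A') ++ [b])
          = a ++ ' ' :: List.intercalate [' '] ((a' :: A') ++ [b]) := by
        simp [List.intercalate, List.intersperse]
      have h2 : List.intercalate [' '] (a :: a' :: A')
          = a ++ ' ' :: List.intercalate [' '] (a' :: A') := by
        simp [List.intercalate, List.intersperse]
      rw [h1, ih b (by simp), h2]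
      simp

lemma pvInterRev : ∀ (L : List (List Char)),
    (List.intercalate [' '] L).reverse = List.intercalate [' '] ((L.map List.reverse).reverse) := by
  intro L
  induction L with
  | nil => simp [List.intercalate]
  | cons w L ih =>
    cases L with
    | nil => simp [List.intercalate, List.intersperse]
    | cons v rest =>
      have h1 : List.intercalate [' '] (w :: v :: rest)
          = w ++ ' ' :: List.intercalate [' '] (v :: rest) := by
        simp [List.intercalate, List.intersperse]
      rw [h1]
      have hne : ((v :: rest).map List.reverse).reverse ≠ [] := by simp
      calc (w ++ ' ' :: List.intercalate [' '] (v :: rest)).reverse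
          = (List.intercalate [' '] (v :: rest)).reverse ++ ' ' :: w.reverse := by simp
        _ = List.intercalate [' '] (((v :: rest).map List.reverse).reverse) ++ ' ' :: w.reverse := by rw [ih]
        _ = List.intercalate [' '] (((v :: rest).map List.reverse).reverse ++ [w.reverse]) := by
              rw [pvInterSnoc _ _ hne]
        _ = _ := by simp

lemma pvLstripInter (L : List (List Char)) (hL : ∀ w ∈ L, pvTok w) :
    PySem.Chars.lstrip (List.intercalate [' '] L) = List.intercalate [' '] L := by
  rcases pvInterHead L hL with h | ⟨c, t', h, hns⟩
  · simp [PySem.Chars.lstrip, h]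
  · simp [PySem.Chars.lstrip, h, hns]

lemma pvStripInter (L : List (List Char)) (hL : ∀ w ∈ L, pvTok w) :
    PySem.Chars.strip (List.intercalate [' '] L) = List.intercalate [' '] L := by
  have hrev : ∀ w ∈ (L.map List.reverse).reverse, pvTok w := by
    intro w hw
    simp only [List.mem_reverse, List.mem_map] at hw
    obtain ⟨v, hv, rfl⟩ := hw
    obtain ⟨hne, hns⟩ := hL v hv
    exact ⟨by simpa using hne, fun c hc => hns c (List.mem_reverse.mp hc)⟩
  have hr : PySem.Chars.rstrip (List.intercalate [' '] L) = List.intercalate [' '] L := by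
    unfold PySem.Chars.rstrip
    rw [pvInterRev]
    have := pvLstripInter _ hrev
    unfold PySem.Chars.lstrip at this
    rw [this, ← pvInterRev, List.reverse_reverse]
  unfold PySem.Chars.strip
  rw [pvLstripInter L hL, hr]

lemma pvSplitOnGoNl : ∀ (fuel : ℕ) (l cur : List Char) (acc : List (List Char)),
    l.length < fuel → '\n' ∉ l →
    PySem.Chars.splitOn.go ['\n'] fuel l cur acc = ((cur.reverse ++ l) :: acc).reverse := by
  intro fuel
  induction fuel with
  | zero => exact fun l cur acc h => absurd h (by omega)
  | succ n ih =>
    intro l cur acc hlen hnl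
    cases l with
    | nil => simp [PySem.Chars.splitOn.go]
    | cons c rest =>
      have hc : c ≠ '\n' := fun h => hnl (by simp [h])
      have hpre : List.isPrefixOf ['\n'] (c :: rest) = false := by
        simp [List.isPrefixOf]
        intro h; exact absurd h.symm hc
      simp only [PySem.Chars.splitOn.go, hpre]
      rw [if_neg (by simp)]
      rw [ih rest (c :: cur) acc (by simpa using Nat.lt_of_succ_lt_succ hlen)
        (fun h => hnl (by simp [h]))]
      simp

lemma pvSplitOnNl (t : List Char) (h : '\n' ∉ t) :
    PySem.Chars.splitOn t ['\n'] = [t] := by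
  unfold PySem.Chars.splitOn
  rw [pvSplitOnGoNl (t.length + 1) t [] [] (by omega) h]
  simp

lemma pvBranchEq (u : List Char) : pvFsA u = pvFsB u := by
  simp only [pvFsA, pvFsB]
  set u1 := pvPhrases.foldl (fun s p => PySem.Chars.replace s p []) u with hu1
  have hTok := pvSplit₀Tok u1
  set L := PySem.Chars.split₀ u1 with hLdef
  have hJ : PySem.Chars.join [' '] L = List.intercalate [' '] L := rfl
  rw [hJ]
  set t := List.intercalate [' '] L with htdef
  have hmem := pvInterMem L hTok
  have hnl : '\n' ∉ t := by
    intro h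
    rcases hmem _ h with h' | h'
    · exact absurd h' (by decide)
    · exact absurd h' (by decide)
  have hstrip : PySem.Chars.strip t = t := pvStripInter L hTok
  have hIn1 : PySem.Chars.isIn ['\n', '•'] t = false := by
    rw [PySem.Chars.isIn_eq_false_iff]
    exact fun hinf => hnl (hinf.subset (by simp))
  have hIn2 : PySem.Chars.isIn ['\n', '-', ' '] t = false := by
    rw [PySem.Chars.isIn_eq_false_iff]
    exact fun hinf => hnl (hinf.subset (by simp))
  rw [if_neg (by simp [hIn1, hIn2])]
  by_cases hb1 : PySem.Chars.startswith t ['-', ' '] = true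
  · have hpre := (PySem.Chars.startswith_iff t ['-', ' ']).mp hb1
    have htne : t ≠ [] := by
      intro h; rw [h] at hpre
      simpa using List.prefix_nil.mp hpre
    have hc : PySem.Chars.isIn ['-', ' '] t = true :=
      (PySem.Chars.isIn_iff_infix _ _).mpr hpre.isInfix
    rw [if_pos (by simp [hc]), if_pos hb1]
    rw [pvSplitOnNl t hnl]
    have hfe : t.isEmpty = false := by simp [htne]
    simp [hstrip, hfe, hb1, List.foldl, PySem.Chars.join, List.intercalate]
  · rw [if_neg hb1]
    by_cases hb2 : (PySem.Chars.startswith t ['*', '*'] && PySem.Chars.endswith t ['*', '*']) = true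
    · have hsw : PySem.Chars.startswith t ['*', '*'] = true := by
        cases h : PySem.Chars.startswith t ['*', '*'] with
        | true => rfl
        | false => rw [h] at hb2; simp at hb2
      have hew : PySem.Chars.endswith t ['*', '*'] = true := by
        cases h : PySem.Chars.endswith t ['*', '*'] with
        | true => rfl
        | false => rw [h] at hb2; simp at hb2
      have hpre := (PySem.Chars.startswith_iff t ['*', '*']).mp hsw
      have htne : t ≠ [] := by
        intro h; rw [h] at hpre
        simpa using List.prefix_nil.mp hpre
      have hc : PySem.Chars.isIn ['*', '*'] t = true :=
        (PySem.Chars.isIn_iff_infix _ _).mpr hpre.isInfix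
      rw [if_pos (by simp [hc]), if_pos hb2]
      rw [pvSplitOnNl t hnl]
      have hfe : t.isEmpty = false := by simp [htne]
      simp [hstrip, hfe, hb1, hsw, hew, List.foldl, PySem.Chars.join, List.intercalate]
    · rw [if_neg hb2]
      by_cases hc : (PySem.Chars.isIn ['*', '*'] t || PySem.Chars.isIn ['-', ' '] t) = true
      · have htne : t ≠ [] := by
          intro h
          rw [h] at hc
          have h1 : PySem.Chars.isIn ['*', '*'] ([] : List Char) = false := by
            rw [PySem.Chars.isIn_eq_false_iff]
            intro hinf; simpa using List.infix_nil.mp hinf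
          have h2 : PySem.Chars.isIn ['-', ' '] ([] : List Char) = false := by
            rw [PySem.Chars.isIn_eq_false_iff]
            intro hinf; simpa using List.infix_nil.mp hinf
          rw [h1, h2] at hc; simp at hc
        have hb2' : ¬(PySem.Chars.startswith t ['*', '*'] = true ∧ PySem.Chars.endswith t ['*', '*'] = true) := by
          simpa using hb2
        rw [if_pos hc]
        rw [pvSplitOnNl t hnl]
        have hfe : t.isEmpty = false := by simp [htne]
        simp [hstrip, hfe, hb1, hb2', List.foldl, PySem.Chars.join, List.intercalate]
      · rw [if_neg hc]

-- ===== VERDICT (by name: the statement is the Claim_ definition above) =====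
theorem format_structured_summary_spec : Claim_equal_format_structured_summary := by
  intro summary_text _
  unfold Spec_format_structured_summary format_structured_summary format_structured_summary_alt
  rw [pvBranchEq]
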